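-- pv_equiv track=rewrite | github.com/artimahub/scala3 | tools/scaladoc_style_counter.py | human_summary
-- ===== SOURCE A (Python) =====
-- from typing import List, Tuple, Optional, Dict
--
-- def human_summary(counts: Dict[str,int]) -> str:
--     lines = []
--     order = ["first", "second", "others"]
--     for k in order:
--         if k in counts:
--             lines.append(f"{k}: {counts[k]}")
--     # include any other unexpected keys
--     for k in sorted(set(counts.keys()) - set(order)):
--         lines.append(f"{k}: {counts[k]}")
--     return "\n".join(lines)
-- ===== SOURCE B (Python) =====
-- from typing import Dict
--
-- _RANK = {"first": 0, "second": 1, "others": 2}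
--
-- def human_summary(counts: Dict[str, int]) -> str:
--     keys = sorted(counts, key=lambda k: (_RANK.get(k, 3), k))
--     return "\n".join(f"{k}: {counts[k]}" for k in keys)
-- ===== Notes on version B (the rewrite author's own statement) =====
-- stated objective: simpler
-- what changed: Replaces the fixed-order priority loop plus a sorted set-difference loop with one sorted pass over all keys using a (rank, name) tuple key, then a single join.
import Mathlib
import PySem

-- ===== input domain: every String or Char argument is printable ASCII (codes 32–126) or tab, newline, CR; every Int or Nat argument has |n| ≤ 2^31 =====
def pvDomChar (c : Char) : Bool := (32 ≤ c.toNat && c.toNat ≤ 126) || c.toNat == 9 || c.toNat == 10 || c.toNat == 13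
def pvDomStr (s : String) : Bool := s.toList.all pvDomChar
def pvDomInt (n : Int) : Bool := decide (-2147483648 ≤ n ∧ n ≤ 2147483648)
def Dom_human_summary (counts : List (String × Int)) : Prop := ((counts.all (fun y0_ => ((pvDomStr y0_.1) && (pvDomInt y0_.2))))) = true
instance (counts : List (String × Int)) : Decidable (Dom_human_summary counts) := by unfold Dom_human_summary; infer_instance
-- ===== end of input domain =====

-- B replaces A's fixed-order priority loop plus sorted set-difference loop by one sorted pass
-- over all keys under a (rank, name) tuple key (objective: simpler decomposition, same cost).

-- shared formatting helper: f"{k}: {counts[k]}"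
def pvFmt (d : PySem.Dict String Int) (k : String) : String :=
  k ++ ": " ++ PySem.Int.toStr (d.getD k 0)

-- ===== PORT A =====
def human_summary (counts : List (String × Int)) : String :=
  let d := PySem.Dict.ofList counts
  let order : List String := ["first", "second", "others"]
  let lines := order.foldl
    (fun acc k => if d.contains k then acc ++ [pvFmt d k] else acc) ([] : List String)
  let lines := (PySem.List.sorted (PySem.Set.diff (PySem.Set.ofList d.keys) order)
      (fun k => k)).foldl (fun acc k => acc ++ [pvFmt d k]) lines
  PySem.Str.join "\n" lines

-- ===== PORT B =====
def pvRank : PySem.Dict String Int :=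
  PySem.Dict.ofList [("first", 0), ("second", 1), ("others", 2)]

def human_summary_alt (counts : List (String × Int)) : String :=
  let d := PySem.Dict.ofList counts
  let keys := PySem.List.sorted d.keys (fun k => toLex (pvRank.getD k 3, k))
  PySem.Str.join "\n" (keys.map (fun k => pvFmt d k))

-- ===== PRECONDITION & SPEC =====
def Spec_human_summary (counts : List (String × Int)) (out : String) : Prop := out = human_summary_alt counts
instance (counts : List (String × Int)) (out : String) : Decidable (Spec_human_summary counts out) := by unfold Spec_human_summary; infer_instance

-- ===== CLAIM (what is proved, stated in full; the proofs are below) =====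
def Claim_equal_human_summary : Prop := ∀ (counts : List (String × Int)), Dom_human_summary counts → Spec_human_summary counts (human_summary counts)

-- ===== LEMMAS AND PROOFS =====

-- rank of a key outside the priority list is 3
lemma pvRank_getD_of_not_mem (k : String) (h : k ∉ (["first", "second", "others"] : List String)) :
    pvRank.getD k 3 = 3 := by
  apply PySem.Dict.getD_of_not_contains
  simp only [show pvRank = PySem.Dict.mk [("first", (0 : Int)), ("second", 1), ("others", 2)] from rfl,
    PySem.Dict.contains_mk]
  simp only [List.mem_cons, List.not_mem_nil, or_false, not_or] at h
  simp
  exact ⟨fun h1 => h.1 h1.symm, fun h2 => h.2.1 h2.symm, fun h3 => h.2.2 h3.symm⟩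

-- the single (rank, name) sort equals A's two-phase key order
lemma pvKeys_split (d : PySem.Dict String Int) (hnd : d.keys.Nodup) :
    PySem.List.sorted d.keys (fun k => toLex (pvRank.getD k 3, k))
      = (["first", "second", "others"] : List String).filter (fun k => d.contains k)
        ++ PySem.List.sorted (PySem.Set.diff (PySem.Set.ofList d.keys)
             (["first", "second", "others"] : List String)) (fun k => k) := by
  have hof : PySem.Set.ofList d.keys = d.keys := PySem.Set.ofList_eq_self_of_nodup _ hnd
  set order : List String := ["first", "second", "others"] with horder
  set Q : List String := PySem.Set.diff (PySem.Set.ofList d.keys) order with hQ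
  have hQ' : Q = d.keys.filter (fun x => !order.contains x) := by
    rw [hQ, PySem.Set.diff, hof]
    simp [PySem.Set.contains_eq_listContains]
  have hQnd : Q.Nodup := by rw [hQ']; exact hnd.filter _
  have hmemQ : ∀ x, x ∈ Q ↔ x ∈ d.keys ∧ x ∉ order := by
    intro x; rw [hQ']; simp [List.mem_filter]
  set S := PySem.List.sorted Q (fun k => (k : String)) with hS
  have hSQ : S.Perm Q := PySem.List.sorted_perm _ _ _
  have hmemS : ∀ x, x ∈ S ↔ x ∈ d.keys ∧ x ∉ order := by
    intro x; rw [hSQ.mem_iff]; exact hmemQ x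
  apply PySem.List.sorted_eq_of_perm_of_pairwise_lt
  · -- the two-phase list is a permutation of the keys
    have h1 : (order.filter (fun k => d.contains k)).Perm
        (d.keys.filter (fun k => order.contains k)) := by
      rw [List.perm_ext_iff_of_nodup (List.Nodup.filter _ (by rw [horder]; decide))
        (hnd.filter _)]
      intro a
      simp only [List.mem_filter, PySem.Dict.contains_iff_mem_keys, List.contains_iff_mem]
      exact ⟨fun ⟨h1, h2⟩ => ⟨h2, by simpa using h1⟩, fun ⟨h1, h2⟩ => ⟨by simpa using h2, h1⟩⟩
    have h2 : S.Perm (d.keys.filter (fun x => !order.contains x)) := by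
      rw [hQ'] at hSQ; exact hSQ
    exact (h1.append h2).trans (List.filter_append_perm _ _)
  · -- and strictly increasing under the (rank, name) key
    rw [List.pairwise_append]
    refine ⟨?_, ?_, ?_⟩
    · -- priority part: the ranks 0 < 1 < 2
      exact List.Pairwise.sublist List.filter_sublist (by rw [horder]; decide)
    · -- tail part: ranks all 3, names strictly increasing
      have hle : S.Pairwise (fun a b => (a : String) ≤ b) := PySem.List.sorted_pairwise _ _
      have hne : S.Pairwise (fun a b => a ≠ b) := hSQ.nodup_iff.mpr hQnd
      have hlt : S.Pairwise (fun a b => a < b) :=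
        (hle.and hne).imp (fun h => lt_of_le_of_ne h.1 h.2)
      refine hlt.imp_of_mem (fun {a b} ha hb hab => ?_)
      rw [Prod.Lex.toLex_lt_toLex]
      right
      refine ⟨?_, hab⟩
      rw [pvRank_getD_of_not_mem a (((hmemS a).mp ha).2),
        pvRank_getD_of_not_mem b (((hmemS b).mp hb).2)]
    · -- every priority key sorts before every other key
      intro a ha b hb
      have hb' : b ∉ order := ((hmemS b).mp hb).2
      have hao : a ∈ order := (List.mem_filter.mp ha).1
      rw [Prod.Lex.toLex_lt_toLex]
      left
      rw [pvRank_getD_of_not_mem b hb']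
      rw [horder] at hao
      simp only [List.mem_cons, List.not_mem_nil, or_false] at hao
      rcases hao with rfl | rfl | rfl
      · show pvRank.getD "first" 3 < 3; decide
      · show pvRank.getD "second" 3 < 3; decide
      · show pvRank.getD "others" 3 < 3; decide

-- ===== VERDICT (by name: the statement is the Claim_ definition above) =====
theorem human_summary_spec : Claim_equal_human_summary := by
  intro counts _
  unfold Spec_human_summary human_summary human_summary_alt
  simp only [pvKeys_split (PySem.Dict.ofList counts) (PySem.Dict.nodup_keys_ofList counts),
    PySem.List.foldl_append_if, PySem.List.foldl_append_singleton_eq_map,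
    List.map_append, List.nil_append]
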